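-- pv_equiv track=rewrite | github.com/i-w-i-w-d/Algoritm-And-Structure-Of-Information | Hm02/ex.2.11.py | task_2_11
-- ===== SOURCE A (Python) =====
-- def task_2_11(n):
--     # Асимптотична оцінка: O(n ^ 2)
--     # Зовнішній цикл виконується n разів.
--     # Внутрішній виклик (sum від 1 до i) виконується i разів.
--     result = 0
--     for i in range(1, n + 1):
--         # Імітація виклику неоптимізованої функції f(i)
--         term = 0
--         for j in range(1, i + 1):
--             term += j
--         result += i + term
--     return result
-- ===== SOURCE B (Python) =====
-- def task_2_11(n):
--     # Closed form: sum_{i=1..n} (i + i*(i+1)/2) = n(n+1)/2 + n(n+1)(n+2)/6, O(1).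
--     m = n if n > 0 else 0
--     return m * (m + 1) // 2 + m * (m + 1) * (m + 2) // 6
-- ===== Notes on version B (the rewrite author's own statement) =====
-- stated objective: faster
-- what changed: Replaced the nested O(n^2) accumulation loops by the closed-form formula n(n+1)/2 + n(n+1)(n+2)/6.
import Mathlib
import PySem

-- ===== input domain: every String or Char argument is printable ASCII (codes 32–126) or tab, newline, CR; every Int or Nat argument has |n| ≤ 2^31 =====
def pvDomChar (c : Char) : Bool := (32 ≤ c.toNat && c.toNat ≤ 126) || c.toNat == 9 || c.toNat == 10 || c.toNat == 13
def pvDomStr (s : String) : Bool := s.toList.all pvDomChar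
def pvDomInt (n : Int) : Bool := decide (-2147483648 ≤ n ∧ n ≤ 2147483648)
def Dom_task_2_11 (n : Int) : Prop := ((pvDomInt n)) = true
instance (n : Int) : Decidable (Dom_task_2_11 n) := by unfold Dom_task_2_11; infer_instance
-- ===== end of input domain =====

-- B replaces A's nested accumulation loops by the closed-form formula (objective: faster, O(1) vs O(n^2)).

-- ===== PORT A =====
def task_2_11 (n : Int) : Int :=
  (PySem.List.pyRange 1 (n + 1) 1).foldl
    (fun result i =>
      result + (i + (PySem.List.pyRange 1 (i + 1) 1).foldl (fun term j => term + j) 0))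
    0

-- ===== PORT B =====
def task_2_11_alt (n : Int) : Int :=
  let m : Int := if n > 0 then n else 0
  PySem.Int.floordiv (m * (m + 1)) 2 + PySem.Int.floordiv (m * (m + 1) * (m + 2)) 6

-- ===== PRECONDITION & SPEC =====
def Spec_task_2_11 (n : Int) (out : Int) : Prop := out = task_2_11_alt n
instance (n : Int) (out : Int) : Decidable (Spec_task_2_11 n out) := by unfold Spec_task_2_11; infer_instance

-- ===== CLAIM (what is proved, stated in full; the proofs are below) =====
def Claim_equal_task_2_11 : Prop := ∀ (n : Int), Dom_task_2_11 n → Spec_task_2_11 n (task_2_11 n)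

-- ===== LEMMAS AND PROOFS =====

-- inner loop: 2 * (sum of 1..m) = m*(m+1)
theorem pv_inner_sum (m : Nat) :
    2 * (PySem.List.pyRange 1 ((m : Int) + 1) 1).foldl (fun term j => term + j) 0
      = (m : Int) * ((m : Int) + 1) := by
  induction m with
  | zero => simp [PySem.List.pyRange_one_eq_nil]
  | succ k ih =>
      have h : (1 : Int) ≤ (k : Int) + 1 := by omega
      rw [show ((k + 1 : Nat) : Int) + 1 = ((k : Int) + 1) + 1 by push_cast; ring,
          PySem.List.pyRange_one_succ_right h, List.foldl_append]
      simp only [List.foldl_cons, List.foldl_nil]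
      push_cast
      ring_nf
      ring_nf at ih
      omega

-- outer loop: 6 * result = 3*n*(n+1) + n*(n+1)*(n+2)  (for n = k ≥ 0)
theorem pv_outer_sum (k : Nat) :
    6 * task_2_11 (k : Int)
      = 3 * ((k : Int) * ((k : Int) + 1)) + (k : Int) * ((k : Int) + 1) * ((k : Int) + 2) := by
  induction k with
  | zero => simp [task_2_11, PySem.List.pyRange_one_eq_nil]
  | succ k ih =>
      have h : (1 : Int) ≤ (k : Int) + 1 := by omega
      unfold task_2_11 at ih ⊢
      rw [show ((k + 1 : Nat) : Int) + 1 = ((k : Int) + 1) + 1 by push_cast; ring,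
          PySem.List.pyRange_one_succ_right h, List.foldl_append]
      simp only [List.foldl_cons, List.foldl_nil]
      have hin := pv_inner_sum (k + 1)
      push_cast at hin ⊢
      ring_nf
      ring_nf at ih hin
      omega

-- 2 ∣ m*(m+1)
theorem pv_two_dvd (m : Int) : (m * (m + 1)) % 2 = 0 := by
  rcases Int.even_mul_succ_self m with ⟨c, hc⟩
  omega

-- 6 ∣ k*(k+1)*(k+2) for k : Nat
theorem pv_six_dvd (k : Nat) : ((k : Int) * ((k : Int) + 1) * ((k : Int) + 2)) % 6 = 0 := by
  induction k with
  | zero => decide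
  | succ k ih =>
      have h2 := pv_two_dvd ((k : Int) + 1)
      have hstep : ((k + 1 : Nat) : Int) * (((k + 1 : Nat) : Int) + 1) * (((k + 1 : Nat) : Int) + 2)
          = (k : Int) * ((k : Int) + 1) * ((k : Int) + 2)
            + 3 * (((k : Int) + 1) * (((k : Int) + 1) + 1)) := by push_cast; ring
      omega

theorem pv_alt_nonneg (k : Nat) :
    6 * task_2_11_alt (k : Int)
      = 3 * ((k : Int) * ((k : Int) + 1)) + (k : Int) * ((k : Int) + 1) * ((k : Int) + 2) := by
  have h2 := pv_two_dvd (k : Int)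
  have h6 := pv_six_dvd k
  rcases Nat.eq_zero_or_pos k with h | h
  · subst h; decide
  · have hk : ((k : Int) > 0) := by exact_mod_cast h
    simp only [task_2_11_alt]
    rw [if_pos hk, PySem.Int.floordiv_eq_ediv_of_pos (by omega),
        PySem.Int.floordiv_eq_ediv_of_pos (by omega)]
    omega

-- ===== VERDICT (by name: the statement is the Claim_ definition above) =====
theorem task_2_11_spec : Claim_equal_task_2_11 := by
  intro n _
  unfold Spec_task_2_11
  by_cases h : n ≤ 0
  · have hA : task_2_11 n = 0 := by
      unfold task_2_11
      rw [PySem.List.pyRange_one_eq_nil (by omega)]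
      rfl
    have hB : task_2_11_alt n = 0 := by
      simp only [task_2_11_alt]
      rw [if_neg (by omega)]
      decide
    rw [hA, hB]
  · obtain ⟨k, hk⟩ : ∃ k : Nat, n = (k : Int) := ⟨n.toNat, by omega⟩
    subst hk
    have hA := pv_outer_sum k
    have hB := pv_alt_nonneg k
    omega
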